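-- pv_equiv track=rewrite | github.com/deepin-community/debputy | src/debputy/packager_provided_files.py | _period_stem
-- ===== SOURCE A (Python) =====
-- from typing import Mapping, Iterable, Dict, List, Optional, Tuple, Sequence, Container
--
-- def _period_stem(stems: Iterable[str]) -> Mapping[int, Sequence[str]]:
--     result: Dict[int, List[str]] = {}
--     for stem in stems:
--         period_count = stem.count(".")
--         matched_stems = result.get(period_count)
--         if not matched_stems:
--             matched_stems = [stem]
--             result[period_count] = matched_stems
--         else:
--             matched_stems.append(stem)
--     return result
-- ===== SOURCE B (Python) =====
-- def _period_stem(stems):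
--     stems = list(stems)
--     keys = [s.count(".") for s in stems]
--     return {
--         k: [s for s, c in zip(stems, keys) if c == k]
--         for k in dict.fromkeys(keys)
--     }
-- ===== Notes on version B (the rewrite author's own statement) =====
-- stated objective: alternative
-- what changed: Replaces the streaming per-element dict bucketing (get, truthiness test, in-place append) with a two-pass comprehension: compute all period counts once, take their first-appearance dedup as keys, and build each group by filtering the stem/count pairs.
import Mathlib
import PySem

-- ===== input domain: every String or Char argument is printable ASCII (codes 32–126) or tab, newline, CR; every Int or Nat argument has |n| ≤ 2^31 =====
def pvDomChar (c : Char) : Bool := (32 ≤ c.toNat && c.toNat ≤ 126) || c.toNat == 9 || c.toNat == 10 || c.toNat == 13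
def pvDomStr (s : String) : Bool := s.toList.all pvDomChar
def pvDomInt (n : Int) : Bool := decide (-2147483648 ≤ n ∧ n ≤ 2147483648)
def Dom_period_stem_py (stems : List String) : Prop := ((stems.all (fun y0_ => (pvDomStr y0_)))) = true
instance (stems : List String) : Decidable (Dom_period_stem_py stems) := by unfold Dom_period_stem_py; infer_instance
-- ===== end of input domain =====

-- B replaces A's streaming dict bucketing with dedup-keys + per-key filtering (alternative decomposition, same output).

-- ===== PORT A =====
-- the period count of a stem: stem.count(".")
def pvKey (stem : String) : Int := (PySem.Str.count stem "." : Int)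

-- one iteration of A's loop body
def pvStepA (d : PySem.Dict Int (List String)) (stem : String) : PySem.Dict Int (List String) :=
  let period_count := pvKey stem
  match d.get? period_count with
  | none => d.insert period_count [stem]                -- 'if not matched_stems' (absent)
  | some matched_stems =>
      if matched_stems.isEmpty then d.insert period_count [stem]   -- 'if not matched_stems' (empty list)
      else d.modify period_count [] (· ++ [stem])       -- matched_stems.append(stem)

def period_stem_py (stems : List String) : List (Int × List String) :=
  (stems.foldl pvStepA PySem.Dict.empty).items

-- ===== PORT B =====
def period_stem_py_alt (stems : List String) : List (Int × List String) :=
  -- keys = [s.count(".") for s in stems]; groups: dict.fromkeys(keys) = PySem.List.dedup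
  (PySem.List.dedup (stems.map pvKey)).map
    (fun k => (k, ((stems.zip (stems.map pvKey)).filter (fun p => p.2 == k)).map (fun p => p.1)))

-- ===== PRECONDITION & SPEC =====
def Spec_period_stem_py (stems : List String) (out : List (Int × List String)) : Prop := out = period_stem_py_alt stems
instance (stems : List String) (out : List (Int × List String)) : Decidable (Spec_period_stem_py stems out) := by unfold Spec_period_stem_py; infer_instance

-- ===== CLAIM (what is proved, stated in full; the proofs are below) =====
def Claim_equal_period_stem_py : Prop := ∀ (stems : List String), Dom_period_stem_py stems → Spec_period_stem_py stems (period_stem_py stems)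

-- ===== LEMMAS AND PROOFS =====

-- A's branchy step is exactly a 'modify key [] (· ++ [stem])'
theorem pvStepA_eq_modify (d : PySem.Dict Int (List String)) (stem : String) :
    pvStepA d stem = d.modify (pvKey stem) [] (· ++ [stem]) := by
  unfold pvStepA
  cases h : d.get? (pvKey stem) with
  | none => simp [PySem.Dict.modify, PySem.Dict.getD, h]
  | some l =>
    by_cases hl : l = []
    · subst hl; simp [PySem.Dict.modify, PySem.Dict.getD, h]
    · simp [PySem.Dict.modify, PySem.Dict.getD, h, hl]

theorem pvFoldA_eq (stems : List String) :
    stems.foldl pvStepA PySem.Dict.empty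
      = (stems.map (fun s => (pvKey s, s))).foldl
          (fun d p => d.modify p.1 [] (· ++ [p.2])) PySem.Dict.empty := by
  rw [List.foldl_map]
  congr 1
  funext d s
  exact pvStepA_eq_modify d s

theorem pvFilter_pairs (stems : List String) (k : Int) :
    (((stems.zip (stems.map pvKey)).filter (fun p => p.2 == k)).map (fun p => p.1))
      = ((stems.map (fun s => (pvKey s, s))).filter (fun p => p.1 == k)).map (fun p => p.2) := by
  induction stems with
  | nil => rfl
  | cons s t ih =>
    by_cases h : pvKey s = k
    · simp [h, ih]
    · simp [h, ih]

-- ===== VERDICT (by name: the statement is the Claim_ definition above) =====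
theorem period_stem_py_spec : Claim_equal_period_stem_py := by
  intro stems _
  show period_stem_py stems = period_stem_py_alt stems
  unfold period_stem_py period_stem_py_alt
  rw [pvFoldA_eq]
  have hkeys : ((stems.map (fun s => (pvKey s, s))).foldl
      (fun d p => d.modify p.1 [] (· ++ [p.2])) PySem.Dict.empty).keys
      = PySem.List.dedup (stems.map pvKey) := by
    have h := PySem.Dict.keys_foldl_modify_key (stems.map (fun s => (pvKey s, s)))
      (fun p : Int × String => p.1) [] (fun _ p v => v ++ [p.2]) PySem.Dict.empty
    simpa [PySem.Set.update, PySem.Set.ofList, PySem.List.dedup_eq_ofList, PySem.Set.empty,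
      PySem.Dict.empty, PySem.Dict.keys, List.map_map, Function.comp] using h
  have hnd : ((stems.map (fun s => (pvKey s, s))).foldl
      (fun d p => d.modify p.1 [] (· ++ [p.2])) PySem.Dict.empty).keys.Nodup := by
    rw [hkeys]; exact PySem.List.nodup_dedup _
  rw [PySem.Dict.items_eq_map_keys _ hnd [], hkeys]
  apply List.map_congr_left
  intro k _
  have hg := PySem.Dict.getD_foldl_modify_append (stems.map (fun s => (pvKey s, s)))
    (PySem.Dict.empty : PySem.Dict Int (List String)) k
  rw [hg, pvFilter_pairs]
  simp [PySem.Dict.getD, PySem.Dict.get?, PySem.Dict.empty]
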